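-- pv_equiv track=rewrite | github.com/pdaambrosio/python | Ad-Hoc/uri2140.py | two_bills
-- ===== SOURCE A (Python) =====
-- def two_bills(buy_price: int, price_paid: int) -> bool:
--     bills: list[int] = [2, 5, 10, 20, 50, 100]
--     the_change: int = price_paid - buy_price
--     result: bool = False
--
--     for i in range(len(bills)):
--         for n in range(len(bills)):
--             if bills[i] + bills[n] == the_change:
--                 result = True
--
--     return result
-- ===== SOURCE B (Python) =====
-- def two_bills(buy_price: int, price_paid: int) -> bool:
--     bills = [2, 5, 10, 20, 50, 100]
--     change = price_paid - buy_price
--     bset = set(bills)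
--     return any(change - b in bset for b in bills)
-- ===== Notes on version B (the rewrite author's own statement) =====
-- stated objective: simpler
-- what changed: Replaces A's nested double loop over all bill pairs with a single pass over the bills testing membership of change-b in the bill set (a bill may pair with itself, matching A's independent index ranges).
import Mathlib
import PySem

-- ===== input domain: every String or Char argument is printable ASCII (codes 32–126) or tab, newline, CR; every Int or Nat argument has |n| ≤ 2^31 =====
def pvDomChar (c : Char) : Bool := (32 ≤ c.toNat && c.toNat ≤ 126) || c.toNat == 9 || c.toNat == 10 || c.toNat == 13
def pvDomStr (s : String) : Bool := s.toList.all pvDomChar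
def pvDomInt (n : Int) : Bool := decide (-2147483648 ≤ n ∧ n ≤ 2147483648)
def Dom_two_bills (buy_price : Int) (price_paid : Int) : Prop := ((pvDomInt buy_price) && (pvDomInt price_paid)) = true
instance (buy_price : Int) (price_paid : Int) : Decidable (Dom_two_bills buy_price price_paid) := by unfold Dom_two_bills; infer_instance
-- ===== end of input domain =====

-- B replaces A's nested double loop over all bill pairs with a single pass using
-- set membership (objective: simpler; same exact boolean result).

-- ===== PORT A =====
def two_bills (buy_price : Int) (price_paid : Int) : Bool :=
  let bills : List Int := [2, 5, 10, 20, 50, 100]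
  let the_change : Int := price_paid - buy_price
  (PySem.List.pyRange 0 (bills.length : Int) 1).foldl (fun result i =>
    (PySem.List.pyRange 0 (bills.length : Int) 1).foldl (fun result n =>
      if PySem.List.pyGetD bills i 0 + PySem.List.pyGetD bills n 0 == the_change then true
      else result) result) false

-- ===== PORT B =====
def two_bills_alt (buy_price : Int) (price_paid : Int) : Bool :=
  let bills : List Int := [2, 5, 10, 20, 50, 100]
  let change : Int := price_paid - buy_price
  let bset : PySem.Set Int := PySem.Set.ofList bills
  bills.any (fun b => PySem.Set.contains bset (change - b))

-- ===== PRECONDITION & SPEC =====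
def Spec_two_bills (buy_price : Int) (price_paid : Int) (out : Bool) : Prop := out = two_bills_alt buy_price price_paid
instance (buy_price : Int) (price_paid : Int) (out : Bool) : Decidable (Spec_two_bills buy_price price_paid out) := by unfold Spec_two_bills; infer_instance

-- ===== CLAIM (what is proved, stated in full; the proofs are below) =====
def Claim_equal_two_bills : Prop := ∀ (buy_price : Int) (price_paid : Int), Dom_two_bills buy_price price_paid → Spec_two_bills buy_price price_paid (two_bills buy_price price_paid)

-- ===== LEMMAS AND PROOFS =====

-- ===== VERDICT (by name: the statement is the Claim_ definition above) =====
theorem two_bills_spec : Claim_equal_two_bills := by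
  intro buy_price price_paid _
  unfold Spec_two_bills
  simp only [two_bills, two_bills_alt]
  generalize price_paid - buy_price = c
  have hr : PySem.List.pyRange 0 (([2,5,10,20,50,100] : List Int).length : Int) 1
      = [0,1,2,3,4,5] := by decide
  have hs : PySem.Set.ofList ([2,5,10,20,50,100] : List Int) = [2,5,10,20,50,100] := by decide
  rw [hr, hs]
  simp only [List.foldl, List.any, PySem.Set.contains, List.contains_eq_mem, List.mem_cons,
    List.not_mem_nil, or_false]
  norm_num [PySem.List.pyGetD, PySem.List.pyGet?, PySem.List.pyIdx?]
  simp only [show ((5:Int).toNat)=5 from rfl, show ((4:Int).toNat)=4 from rfl,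
    show ((3:Int).toNat)=3 from rfl, show ((2:Int).toNat)=2 from rfl,
    List.getElem_cons_succ, List.getElem_cons_zero]
  norm_num
  rw [Bool.eq_iff_iff]
  simp only [Bool.or_eq_true, decide_eq_true_eq, if_true_left]
  constructor <;> intro h <;> omega
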